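-- pv_equiv track=rewrite | github.com/bennybeats625/mint_ii | mint_ii_functions.py | beat_unmapping
-- ===== SOURCE A (Python) =====
-- beat_map = [1, 2, 4, 8, 16, 32, 64, 128]
--
-- BEAT_CNT_OFFSET = 1
--
-- def beat_unmapping(tokens):
--
--     token_to_beat = {BEAT_CNT_OFFSET + i: val for i, val in enumerate(beat_map)}
--
--     new_tokens = []
--
--     # Step 1: Split the token sequence into alternating groups of beat tokens and non-beat tokens
--     grouped_sequences = []
--     current_group = []
--     is_beat_group = tokens[0] in token_to_beat  # Check if first token is a beat token
--
--     for token in tokens: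
--         if (token in token_to_beat) == is_beat_group:
--             current_group.append(token)
--         else:
--             grouped_sequences.append(current_group)
--             current_group = [token]
--             is_beat_group = not is_beat_group  # Toggle group type
--
--     if current_group:
--         grouped_sequences.append(current_group)
--
--     # Step 2: Process each sequence separately
--     for group in grouped_sequences:
--         if group[0] in token_to_beat:  # It's a beat sequence
--             for token in group:
--                 new_tokens.extend([1] * token_to_beat[token])  # Expand each beat token into 1s
--         else:  # Non-beat tokens, just append them
--             new_tokens.extend(group)
--
--     return new_tokens
-- ===== SOURCE B (Python) =====
-- beat_map = [1, 2, 4, 8, 16, 32, 64, 128]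
--
-- BEAT_CNT_OFFSET = 1
--
-- def beat_unmapping(tokens):
--     token_to_beat = {BEAT_CNT_OFFSET + i: val for i, val in enumerate(beat_map)}
--     new_tokens = []
--     for token in tokens:
--         if token in token_to_beat:
--             new_tokens.extend([1] * token_to_beat[token])
--         else:
--             new_tokens.append(token)
--     return new_tokens
-- ===== Notes on version B (the rewrite author's own statement) =====
-- stated objective: simpler
-- what changed: B replaces A's two-phase algorithm (partition tokens into alternating beat/non-beat runs, then expand each run) with a single streaming pass that expands or copies each token directly; Pre_ excludes only the empty list, where A raises IndexError reading the first token.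
import Mathlib
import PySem

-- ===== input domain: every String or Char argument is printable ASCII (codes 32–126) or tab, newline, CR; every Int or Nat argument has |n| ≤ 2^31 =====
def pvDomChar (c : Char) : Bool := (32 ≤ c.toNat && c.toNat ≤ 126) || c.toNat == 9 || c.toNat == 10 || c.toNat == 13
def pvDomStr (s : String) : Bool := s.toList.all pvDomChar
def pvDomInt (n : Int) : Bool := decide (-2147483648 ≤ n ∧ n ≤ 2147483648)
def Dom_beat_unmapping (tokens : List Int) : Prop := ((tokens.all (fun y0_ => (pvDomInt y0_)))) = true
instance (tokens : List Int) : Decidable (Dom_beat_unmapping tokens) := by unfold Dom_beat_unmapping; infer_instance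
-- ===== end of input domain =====

-- B is a single streaming pass (expand or copy each token directly) instead of A's
-- two-phase partition-into-runs-then-expand; objective: simpler. Return value only.

-- ===== PORT A =====
-- beat_map and token_to_beat = {BEAT_CNT_OFFSET + i: val for i, val in enumerate(beat_map)}
def beatMapA : List Int := [1, 2, 4, 8, 16, 32, 64, 128]

def tokenToBeat : PySem.Dict Int Int :=
  (PySem.List.enumerate beatMapA 0).foldl (fun d p => d.insert (1 + p.1) p.2) PySem.Dict.empty

-- Step 1 loop of A: split into alternating groups; returns (grouped_sequences, current_group, is_beat_group)
def pvGroupLoop (ts : List Int) (grouped : List (List Int)) (cur : List Int) (b : Bool) :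
    List (List Int) × List Int :=
  match ts with
  | [] => (grouped, cur)
  | t :: rest =>
      if tokenToBeat.contains t == b then
        pvGroupLoop rest grouped (cur ++ [t]) b
      else
        pvGroupLoop rest (grouped ++ [cur]) [t] (!b)

-- Step 2 of A: process one group (group[0] read via pyGet?; groups are never empty in A)
def pvProcessGroup (group : List Int) : List Int :=
  if tokenToBeat.contains ((PySem.List.pyGet? group 0).getD 0) then
    group.foldl (fun acc t => acc ++ List.replicate (tokenToBeat.getD t 0).toNat 1) []
  else
    group

def beat_unmapping (tokens : List Int) : List Int :=
  let isBeat0 := tokenToBeat.contains ((PySem.List.pyGet? tokens 0).getD 0)  -- A reads the first token: Pre_ excludes the empty list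
  let st := pvGroupLoop tokens [] [] isBeat0
  let grouped := if st.2 ≠ [] then st.1 ++ [st.2] else st.1
  grouped.foldl (fun acc g => acc ++ pvProcessGroup g) []

-- ===== PORT B =====
def beat_unmapping_alt (tokens : List Int) : List Int :=
  tokens.foldl
    (fun acc t =>
      if tokenToBeat.contains t then
        acc ++ List.replicate (tokenToBeat.getD t 0).toNat 1
      else
        acc ++ [t])
    []

-- ===== PRECONDITION & SPEC =====
-- Pre_ excludes only the empty list, on which A raises IndexError reading the first token (B returns the empty list there).
def Pre_beat_unmapping (tokens : List Int) : Prop := tokens ≠ []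
instance (tokens : List Int) : Decidable (Pre_beat_unmapping tokens) := by unfold Pre_beat_unmapping; infer_instance
def pvWitness_beat_unmapping : List Int := [2, 300, 9]

def Spec_beat_unmapping (tokens : List Int) (out : List Int) : Prop := out = beat_unmapping_alt tokens
instance (tokens : List Int) (out : List Int) : Decidable (Spec_beat_unmapping tokens out) := by unfold Spec_beat_unmapping; infer_instance

-- ===== CLAIM (what is proved, stated in full; the proofs are below) =====
def Claim_equal_beat_unmapping : Prop := ∀ (tokens : List Int), Dom_beat_unmapping tokens → Pre_beat_unmapping tokens → Spec_beat_unmapping tokens (beat_unmapping tokens)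

-- ===== LEMMAS AND PROOFS =====

-- B's per-token contribution
def pvTok (t : Int) : List Int :=
  if tokenToBeat.contains t then List.replicate (tokenToBeat.getD t 0).toNat 1 else [t]

-- finalize A's loop state and run A's Step 2
def pvFinish (st : List (List Int) × List Int) : List Int :=
  (if st.2 ≠ [] then st.1 ++ [st.2] else st.1).flatMap pvProcessGroup

lemma alt_eq_flatMap (tokens : List Int) : beat_unmapping_alt tokens = tokens.flatMap pvTok := by
  have hbody : (fun (acc : List Int) (t : Int) =>
      if tokenToBeat.contains t then
        acc ++ List.replicate (tokenToBeat.getD t 0).toNat 1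
      else acc ++ [t]) = fun acc t => acc ++ pvTok t := by
    funext acc t
    unfold pvTok
    split <;> rfl
  unfold beat_unmapping_alt
  rw [hbody, PySem.List.foldl_append_eq_flatMap]
  rfl

-- tokens that are all non-beat expand to themselves
lemma flatMap_nonbeat (g : List Int) (h : ∀ x ∈ g, tokenToBeat.contains x = false) :
    g.flatMap pvTok = g := by
  induction g with
  | nil => rfl
  | cons x xs ih =>
      simp only [List.flatMap_cons]
      rw [ih (fun y hy => h y (List.mem_cons_of_mem _ hy))]
      unfold pvTok
      rw [h x List.mem_cons_self]
      rfl

-- a homogeneous group is processed to its token-wise expansion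
lemma process_homog (g : List Int) (b : Bool) (h : ∀ x ∈ g, tokenToBeat.contains x = b) :
    pvProcessGroup g = g.flatMap pvTok := by
  cases g with
  | nil => cases b <;> rfl
  | cons x xs =>
      have hx : tokenToBeat.contains x = b := h x List.mem_cons_self
      unfold pvProcessGroup
      rw [show (PySem.List.pyGet? (x :: xs) 0).getD 0 = x by simp [PySem.List.pyGet?, PySem.List.pyIdx?], hx]
      cases b with
      | false =>
          rw [if_neg (by simp)]
          exact (flatMap_nonbeat _ h).symm
      | true =>
          rw [if_pos rfl,
            PySem.List.foldl_append_eq_flatMap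
              (fun t => List.replicate (tokenToBeat.getD t 0).toNat 1) (x :: xs) []]
          rw [List.nil_append]
          apply List.flatMap_congr
          intro t ht
          unfold pvTok
          rw [h t ht, if_pos rfl]

-- main invariant for A's grouping loop
lemma groupLoop_spec (ts : List Int) (grouped : List (List Int)) (cur : List Int) (b : Bool)
    (h : ∀ x ∈ cur, tokenToBeat.contains x = b) :
    pvFinish (pvGroupLoop ts grouped cur b)
    = grouped.flatMap pvProcessGroup ++ cur.flatMap pvTok ++ ts.flatMap pvTok := by
  induction ts generalizing grouped cur b with
  | nil =>
      by_cases hc : cur = []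
      · subst hc; simp [pvGroupLoop, pvFinish]
      · simp only [pvGroupLoop, pvFinish]
        rw [if_pos hc, List.flatMap_append, List.flatMap_singleton, process_homog cur b h]
        simp
  | cons t rest ih =>
      simp only [pvGroupLoop]
      by_cases hb : tokenToBeat.contains t = b
      · rw [if_pos (by simp [hb])]
        have h' : ∀ x ∈ cur ++ [t], tokenToBeat.contains x = b := by
          intro x hx
          rcases List.mem_append.1 hx with hx | hx
          · exact h x hx
          · simp at hx; subst hx; exact hb
        rw [ih grouped (cur ++ [t]) b h']
        simp
      · rw [if_neg (by simp [hb])]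
        have h' : ∀ x ∈ [t], tokenToBeat.contains x = !b := by
          intro x hx; simp at hx; subst hx
          cases b <;> simp_all
        rw [ih (grouped ++ [cur]) [t] (!b) h']
        rw [List.flatMap_append, List.flatMap_singleton, process_homog cur b h]
        simp

lemma foldl_groups (gs : List (List Int)) (init : List Int) :
    gs.foldl (fun acc g => acc ++ pvProcessGroup g) init = init ++ gs.flatMap pvProcessGroup :=
  PySem.List.foldl_append_eq_flatMap pvProcessGroup gs init

-- ===== VERDICT (by name: the statement is the Claim_ definition above) =====
theorem beat_unmapping_spec : Claim_equal_beat_unmapping := by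
  intro tokens _ _
  unfold Spec_beat_unmapping beat_unmapping
  rw [alt_eq_flatMap, foldl_groups]
  have := groupLoop_spec tokens [] []
      (tokenToBeat.contains ((PySem.List.pyGet? tokens 0).getD 0)) (by simp)
  simpa [pvFinish] using this
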